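-- pv_equiv track=rewrite | github.com/rcharbey/Egopol | status.py | dict_of_number_of_commenters
-- ===== SOURCE A (Python) =====
-- def dict_of_number_of_comments_by_ego(dict_of_commenters_per_status):
--     result = {}
--     for status in dict_of_commenters_per_status:
--         result[status] = 0
--         for commenter in dict_of_commenters_per_status[status]:
--             if commenter == 0:
--                 result[status] += 1
--     return result
--
-- def dict_of_number_of_commenters(dict_of_commenters_per_status):
--     dict_ego = dict_of_number_of_comments_by_ego(dict_of_commenters_per_status)
--     result = {}
--     for status in dict_of_commenters_per_status:
--         result[status] = len(dict_of_commenters_per_status[status])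
--         if dict_ego[status] != 0:
--             result[status] -= 1
--     return result
-- ===== SOURCE B (Python) =====
-- def dict_of_number_of_commenters(dict_of_commenters_per_status):
--     # One pass per status: count commenters one by one, skipping the first
--     # ego (0) occurrence via a flag; never computes len() or a zero count.
--     result = {}
--     for status, values in dict_of_commenters_per_status.items():
--         n = 0
--         seen_ego = False
--         for v in values:
--             if v == 0 and not seen_ego:
--                 seen_ego = True
--             else:
--                 n += 1
--         result[status] = n
--     return result
-- ===== Notes on version B (the rewrite author's own statement) =====
-- stated objective: simpler
-- what changed: Replaced the two-pass design (a helper builds an intermediate per-status zero-count dict, then a second loop takes len() and consults that dict to subtract) by a single stateful pass that never computes len() or a zero count: it counts commenters one by one and skips the first ego (0) occurrence via a boolean flag.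
import Mathlib
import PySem

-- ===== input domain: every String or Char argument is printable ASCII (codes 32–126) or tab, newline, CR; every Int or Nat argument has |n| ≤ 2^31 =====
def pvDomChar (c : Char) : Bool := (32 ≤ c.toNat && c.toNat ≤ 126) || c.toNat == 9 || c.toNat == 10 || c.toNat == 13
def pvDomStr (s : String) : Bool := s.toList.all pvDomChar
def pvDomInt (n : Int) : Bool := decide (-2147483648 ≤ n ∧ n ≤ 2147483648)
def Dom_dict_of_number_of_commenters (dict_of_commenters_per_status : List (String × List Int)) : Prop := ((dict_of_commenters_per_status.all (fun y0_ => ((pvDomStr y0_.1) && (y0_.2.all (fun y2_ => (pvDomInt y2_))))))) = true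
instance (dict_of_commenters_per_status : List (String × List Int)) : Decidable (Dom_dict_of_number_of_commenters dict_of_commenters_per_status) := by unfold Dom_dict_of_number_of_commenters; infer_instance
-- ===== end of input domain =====

-- B replaces A's two-pass helper+dict design by a single stateful pass per status
-- (count commenters, skipping the first ego/0 via a flag); objective: simpler.


-- ===== PORT A =====
-- A, transliterated: a helper builds an intermediate zero-count dict, a second loop consults it.
def dict_of_number_of_comments_by_ego (dict_of_commenters_per_status : List (String × List Int)) : PySem.Dict String Int :=
  dict_of_commenters_per_status.foldl
    (fun result p =>
      p.2.foldl (fun result commenter =>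
          if commenter = 0 then result.modify p.1 0 (· + 1) else result)
        (result.insert p.1 0))
    PySem.Dict.empty

def dict_of_number_of_commenters (dict_of_commenters_per_status : List (String × List Int)) : List (String × Int) :=
  let dict_ego := dict_of_number_of_comments_by_ego dict_of_commenters_per_status
  (dict_of_commenters_per_status.foldl
    (fun result p =>
      let result := result.insert p.1 (p.2.length : Int)
      if dict_ego.getD p.1 0 ≠ 0 then result.modify p.1 0 (· - 1) else result)
    PySem.Dict.empty).items

-- ===== PORT B =====
-- B's inner loop: count commenters one by one, skipping the first 0 via a flag.
def pvCountSkipEgo (values : List Int) : Int :=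
  (values.foldl
    (fun st v => if v = 0 ∧ st.2 = false then (st.1, true) else (st.1 + 1, st.2))
    ((0 : Int), false)).1

def dict_of_number_of_commenters_alt (dict_of_commenters_per_status : List (String × List Int)) : List (String × Int) :=
  (dict_of_commenters_per_status.foldl
    (fun result p => result.insert p.1 (pvCountSkipEgo p.2))
    PySem.Dict.empty).items

-- ===== PRECONDITION & SPEC =====
-- Pre_ excludes association lists with duplicate status keys: those do not represent any
-- Python dict (dict keys are unique), so A is never called on them.
def Pre_dict_of_number_of_commenters (dict_of_commenters_per_status : List (String × List Int)) : Prop :=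
  (dict_of_commenters_per_status.map Prod.fst).Nodup
instance (dict_of_commenters_per_status : List (String × List Int)) : Decidable (Pre_dict_of_number_of_commenters dict_of_commenters_per_status) := by unfold Pre_dict_of_number_of_commenters; infer_instance

def pvWitness_dict_of_number_of_commenters : (List (String × List Int)) := [("a", [0, 1]), ("b", [2])]

def Spec_dict_of_number_of_commenters (dict_of_commenters_per_status : List (String × List Int)) (out : List (String × Int)) : Prop := out = dict_of_number_of_commenters_alt dict_of_commenters_per_status
instance (dict_of_commenters_per_status : List (String × List Int)) (out : List (String × Int)) : Decidable (Spec_dict_of_number_of_commenters dict_of_commenters_per_status out) := by unfold Spec_dict_of_number_of_commenters; infer_instance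

-- ===== CLAIM (what is proved, stated in full; the proofs are below) =====
def Claim_equal_dict_of_number_of_commenters : Prop := ∀ (dict_of_commenters_per_status : List (String × List Int)), Dom_dict_of_number_of_commenters dict_of_commenters_per_status → Pre_dict_of_number_of_commenters dict_of_commenters_per_status → Spec_dict_of_number_of_commenters dict_of_commenters_per_status (dict_of_number_of_commenters dict_of_commenters_per_status)

-- ===== LEMMAS AND PROOFS =====

-- A's inner zero-counting loop, over any starting value at a fixed key, is an insert of the zero count.
theorem pv_zfold (vs : List Int) (d : PySem.Dict String Int) (k : String) (n : Int) :
    vs.foldl (fun r c => if c = 0 then r.modify k 0 (· + 1) else r) (d.insert k n)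
      = d.insert k (n + (vs.count 0 : Int)) := by
  induction vs generalizing n with
  | nil => simp
  | cons c vs ih =>
    simp only [List.foldl_cons]
    by_cases hc : c = 0
    · subst hc
      rw [show (d.insert k n).modify k 0 (· + 1)
            = (d.insert k n).insert k ((d.insert k n).getD k 0 + 1) from rfl,
          PySem.Dict.getD_insert_self, PySem.Dict.insert_insert_self, if_pos rfl, ih]
      congr 1
      push_cast [List.count_cons]
      simp only [if_true]
      ring
    · rw [if_neg hc, ih]
      congr 2
      simp [hc]

theorem pv_ego_items (d : List (String × List Int)) (h : (d.map Prod.fst).Nodup) :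
    (dict_of_number_of_comments_by_ego d).items
      = d.map (fun p => (p.1, (p.2.count 0 : Int))) := by
  unfold dict_of_number_of_comments_by_ego
  have hstep : (fun (result : PySem.Dict String Int) (p : String × List Int) =>
        p.2.foldl (fun result commenter =>
            if commenter = 0 then result.modify p.1 0 (· + 1) else result)
          (result.insert p.1 0))
      = fun result p => result.insert p.1 ((p.2.count 0 : Int)) := by
    funext result p
    rw [pv_zfold]
    simp
  rw [hstep,
      PySem.Dict.items_foldl_insert_fresh d Prod.fst (fun p => (p.2.count 0 : Int))
        PySem.Dict.empty (by intro a _; simp [PySem.Dict.contains_empty]) h]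
  simp [PySem.Dict.empty]

theorem pv_ego_getD (d : List (String × List Int)) (h : (d.map Prod.fst).Nodup)
    (p : String × List Int) (hp : p ∈ d) :
    (dict_of_number_of_comments_by_ego d).getD p.1 0 = (p.2.count 0 : Int) := by
  apply PySem.Dict.getD_of_mem_items
  · rw [pv_ego_items d h]
    exact List.mem_map.mpr ⟨p, hp, rfl⟩
  · show ((dict_of_number_of_comments_by_ego d).items.map Prod.fst).Nodup
    rw [pv_ego_items d h]
    simpa [Function.comp] using h

-- B's flag fold, from an arbitrary state: counts the length, minus one if the flag
-- is still off and a 0 occurs.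
theorem pv_skipfold (vs : List Int) (n : Int) (b : Bool) :
    (vs.foldl
      (fun st v => if v = 0 ∧ st.2 = false then (st.1, true) else (st.1 + 1, st.2))
      (n, b)).1
    = n + (vs.length : Int) - (if b = false ∧ vs.contains 0 then 1 else 0) := by
  induction vs generalizing n b with
  | nil => simp
  | cons v vs ih =>
    simp only [List.foldl_cons]
    by_cases hb : b = false
    · by_cases hv : v = 0
      · rw [if_pos ⟨hv, hb⟩, ih]
        subst hb hv
        simp only [List.contains_cons]
        push_cast
        simp
        ring
      · rw [if_neg (by simp [hv]), ih]
        subst hb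
        simp only [List.contains_cons]
        rw [show ((0 : Int) == v) = false from by simp [Ne.symm hv]]
        simp only [Bool.false_or, List.length_cons]
        push_cast
        ring_nf
    · have hb' : b = true := by cases b <;> simp_all
      subst hb'
      rw [if_neg (by simp), ih]
      push_cast
      simp
      ring

theorem pv_countSkipEgo (vs : List Int) :
    pvCountSkipEgo vs = (vs.length : Int) - (if vs.contains 0 then 1 else 0) := by
  unfold pvCountSkipEgo
  rw [pv_skipfold]
  simp

-- ===== VERDICT (by name: the statement is the Claim_ definition above) =====
theorem dict_of_number_of_commenters_spec : Claim_equal_dict_of_number_of_commenters := by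
  intro d _ hpre
  show dict_of_number_of_commenters d = dict_of_number_of_commenters_alt d
  unfold dict_of_number_of_commenters dict_of_number_of_commenters_alt
  have hstepA : (fun (result : PySem.Dict String Int) (p : String × List Int) =>
        if (dict_of_number_of_comments_by_ego d).getD p.1 0 ≠ 0
          then (result.insert p.1 (p.2.length : Int)).modify p.1 0 (· - 1)
          else result.insert p.1 (p.2.length : Int))
      = fun result p => result.insert p.1
          (if (dict_of_number_of_comments_by_ego d).getD p.1 0 ≠ 0
            then (p.2.length : Int) - 1 else (p.2.length : Int)) := by
    funext result p
    have hm : (result.insert p.1 (p.2.length : Int)).modify p.1 0 (· - 1)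
        = result.insert p.1 ((p.2.length : Int) - 1) := by
      rw [show (result.insert p.1 (p.2.length : Int)).modify p.1 0 (· - 1)
            = (result.insert p.1 (p.2.length : Int)).insert p.1
                ((result.insert p.1 (p.2.length : Int)).getD p.1 0 - 1) from rfl,
          PySem.Dict.getD_insert_self, PySem.Dict.insert_insert_self]
    rw [hm]
    split_ifs <;> rfl
  simp only [hstepA]
  rw [
      PySem.Dict.items_foldl_insert_fresh d Prod.fst _ PySem.Dict.empty
        (by intro a _; simp [PySem.Dict.contains_empty]) hpre,
      PySem.Dict.items_foldl_insert_fresh d Prod.fst _ PySem.Dict.empty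
        (by intro a _; simp [PySem.Dict.contains_empty]) hpre]
  simp only [PySem.Dict.empty]
  apply List.map_congr_left
  intro p hp
  rw [pv_ego_getD d hpre p hp, pv_countSkipEgo]
  congr 1
  by_cases h0 : (0 : Int) ∈ p.2
  · have hcnt : List.count 0 p.2 ≠ 0 := Nat.pos_iff_ne_zero.mp (List.count_pos_iff.mpr h0)
    have hC : ((List.count 0 p.2 : Nat) : Int) ≠ 0 := by exact_mod_cast hcnt
    rw [if_pos hC, if_pos (show p.2.contains 0 = true by simp [h0])]
  · have hcnt : List.count 0 p.2 = 0 := List.count_eq_zero.mpr h0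
    rw [if_neg (not_not.mpr (by exact_mod_cast hcnt)),
        if_neg (show ¬ p.2.contains 0 = true by simp [h0])]
    ring
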